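-- pv_equiv track=rewrite | github.com/TheMiles/aoc | 21.py | mergeField
-- ===== SOURCE A (Python) =====
-- import math
--
-- def mergeField(field):
--     f = []
--     element_size   = len(field[0])
--     element_number = int(math.sqrt(len(field)/element_size))
--
--     for row  in range(element_number):
--         row_offset = element_size * element_number * row
--         for l in range(element_size):
--             line_offset = row_offset + l
--             f.append("".join([ field[i] for i in range(line_offset,line_offset+element_number*element_size,element_size) ]))
--     return f
-- ===== SOURCE B (Python) =====
-- import math
--
-- def mergeField(field):
--     element_size = len(field[0])
--     element_number = int(math.sqrt(len(field)/element_size))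
--     block_len = element_number * element_size
--     f = []
--     for row in range(element_number):
--         block = field[row*block_len:(row+1)*block_len]
--         chunks = [block[c*element_size:(c+1)*element_size]
--                   for c in range(element_number)]
--         for line in zip(*chunks):
--             f.append("".join(line))
--     return f
-- ===== Notes on version B (the rewrite author's own statement) =====
-- stated objective: idiomatic
-- what changed: replaces strided index arithmetic over the flat list with slicing each block-row into contiguous chunks and transposing them with zip(*chunks)
import Mathlib
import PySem

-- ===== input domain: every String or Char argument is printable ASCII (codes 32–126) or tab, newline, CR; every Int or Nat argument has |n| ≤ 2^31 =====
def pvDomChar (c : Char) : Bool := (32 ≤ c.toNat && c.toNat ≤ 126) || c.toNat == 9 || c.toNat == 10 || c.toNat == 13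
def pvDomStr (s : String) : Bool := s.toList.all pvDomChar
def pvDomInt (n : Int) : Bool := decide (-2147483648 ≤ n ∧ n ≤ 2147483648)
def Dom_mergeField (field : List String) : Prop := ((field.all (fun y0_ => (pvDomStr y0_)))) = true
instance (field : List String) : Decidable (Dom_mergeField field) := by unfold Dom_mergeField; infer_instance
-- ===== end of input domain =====

-- B merges the square grid of fixed-width string elements by slicing each block-row into
-- contiguous chunks and transposing them (zip), instead of A's strided index arithmetic;
-- objective: idiomatic.

-- ===== PORT A =====
def mergeField (field : List String) : List String :=
  -- len(field[0]); Pre_ guarantees field ≠ [], so pyGetD's default is never used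
  let element_size : Nat := (PySem.Str.len (PySem.List.pyGetD field 0 "")).toNat
  -- int(math.sqrt(len(field)/element_size)): equals the floor square root of the Nat
  -- quotient (exact: for list lengths far below 2^53 the float division/sqrt cannot
  -- cross an integer boundary); element_size = 0 (ZeroDivisionError) is outside Pre_
  let element_number : Nat := Nat.sqrt (field.length / element_size)
  (List.range element_number).foldl (fun f row =>
    let row_offset := element_size * element_number * row
    (List.range element_size).foldl (fun f l =>
      let line_offset := row_offset + l
      f ++ [PySem.Str.join ""
        ((PySem.List.pyRange (line_offset : Int)
            ((line_offset : Int) + (element_number : Int) * (element_size : Int))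
            (element_size : Int)).map
          (fun i => PySem.List.pyGetD field i ""))]) f) []

-- ===== PORT B =====
-- Python's zip(*chunks): truncating transpose, step for step
def pyZip (ls : List (List String)) : List (List String) :=
  if h : ls = [] ∨ ls.any List.isEmpty then []
  else (ls.map (fun xs => xs.headD "")) :: pyZip (ls.map List.tail)
termination_by ((ls.headD []).length)
decreasing_by
  rw [not_or] at h
  obtain ⟨h1, h2⟩ := h
  cases ls with
  | nil => exact absurd rfl h1
  | cons a as =>
    have ha : a ≠ [] := by
      intro hnil
      exact h2 (by simp [hnil])
    simp only [List.headD_cons]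
    cases a with
    | nil => exact absurd rfl ha
    | cons c cs => simp

def mergeField_alt (field : List String) : List String :=
  -- len(field[0]); Pre_ guarantees field ≠ [], so pyGetD's default is never used
  let element_size : Nat := (PySem.Str.len (PySem.List.pyGetD field 0 "")).toNat
  -- int(math.sqrt(len(field)/element_size)): same reading as in port A
  let element_number : Nat := Nat.sqrt (field.length / element_size)
  let block_len : Nat := element_number * element_size
  (List.range element_number).foldl (fun f row =>
    let block := PySem.List.slice field (some ((row * block_len : Nat) : Int))
        (some (((row + 1) * block_len : Nat) : Int))
    let chunks := (List.range element_number).map (fun c =>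
      PySem.List.slice block (some ((c * element_size : Nat) : Int))
        (some (((c + 1) * element_size : Nat) : Int)))
    (pyZip chunks).foldl (fun f line => f ++ [PySem.Str.join "" line]) f) []

-- ===== PRECONDITION & SPEC =====
-- Pre_ excludes exactly the inputs where A raises: an empty field (IndexError on field[0])
-- and an empty first string (ZeroDivisionError in len(field)/element_size)
def Pre_mergeField (field : List String) : Prop :=
  field ≠ [] ∧ (field.headD "").toList.length ≠ 0
instance (field : List String) : Decidable (Pre_mergeField field) := by
  unfold Pre_mergeField; infer_instance
def pvWitness_mergeField : List String := ["ab", "cd", "ef", "gh", "ij", "kl", "mn", "op"]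
def Spec_mergeField (field : List String) (out : List String) : Prop := out = mergeField_alt field
instance (field : List String) (out : List String) : Decidable (Spec_mergeField field out) := by unfold Spec_mergeField; infer_instance

-- ===== CLAIM (what is proved, stated in full; the proofs are below) =====
def Claim_equal_mergeField : Prop := ∀ (field : List String), Dom_mergeField field → Pre_mergeField field → Spec_mergeField field (mergeField field)

-- ===== LEMMAS AND PROOFS =====

theorem pyZip_uniform (m : Nat) :
    ∀ (ls : List (List String)), ls ≠ [] → (∀ xs ∈ ls, xs.length = m) →
      pyZip ls = (List.range m).map (fun l => ls.map (fun xs => xs.getD l "")) := by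
  induction m with
  | zero =>
    intro ls hne hlen
    rw [pyZip]
    have hany : (ls = [] ∨ ls.any List.isEmpty) := by
      cases ls with
      | nil => exact Or.inl rfl
      | cons a as =>
        refine Or.inr ?_
        have h0 : a.isEmpty := by
          have ha := hlen a List.mem_cons_self
          simpa [List.isEmpty_iff, List.length_eq_zero_iff] using ha
        simp [List.any_cons, h0]
    rw [dif_pos hany]
    simp
  | succ k ih =>
    intro ls hne hlen
    rw [pyZip]
    have hno : ¬ (ls = [] ∨ ls.any List.isEmpty) := by
      rw [not_or]
      refine ⟨hne, ?_⟩
      simp only [List.any_eq_true, not_exists]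
      rintro xs ⟨hmem, hemp⟩
      have := hlen xs hmem
      rw [List.isEmpty_iff] at hemp
      simp [hemp] at this
    rw [dif_neg hno]
    have hne' : ls.map List.tail ≠ [] := by simpa using hne
    have htail : ∀ xs ∈ ls.map List.tail, xs.length = k := by
      intro xs hx
      obtain ⟨ys, hy, rfl⟩ := List.mem_map.mp hx
      have := hlen ys hy
      simp [List.length_tail, this]
    rw [ih _ hne' htail, List.range_succ_eq_map]
    simp only [List.map_cons, List.map_map]
    congr 1
    · apply List.map_congr_left
      intro xs _
      cases xs <;> simp
    · apply List.map_congr_left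
      intro l _
      simp only [Function.comp]
      apply List.map_congr_left
      intro xs _
      cases xs <;> simp

theorem getD_drop_take {α : Type} (xs : List α) (a m l : Nat) (d : α)
    (hl : l < m) :
    ((xs.drop a).take m).getD l d = xs.getD (a + l) d := by
  simp [List.getD_eq_getElem?_getD, List.getElem?_take_of_lt hl, List.getElem?_drop]

theorem count_eq (es en : Nat) (hes : 0 < es) :
    ((((es : Int) - 1) + (en : Int) * (es : Int)) / (es : Int)).toNat = en := by
  rw [Int.add_mul_ediv_right _ _ (by exact_mod_cast hes.ne')]
  rw [Int.ediv_eq_zero_of_lt (by omega) (by omega)]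
  simp

theorem foldl_foldl_append {α β γ : Type} (outer : List α) (inner : α → List β)
    (g : α → β → γ) :
    outer.foldl (fun acc x => (inner x).foldl (fun acc y => acc ++ [g x y]) acc) [] =
      outer.flatMap (fun x => (inner x).map (g x)) := by
  have h : ∀ (x : α) (acc : List γ),
      (inner x).foldl (fun acc y => acc ++ [g x y]) acc = acc ++ (inner x).map (g x) :=
    fun x acc => PySem.List.foldl_append_singleton_eq_map _ _ _
  simp only [h]
  simpa using PySem.List.foldl_append_eq_flatMap (fun x => (inner x).map (g x)) outer []

theorem mergeField_main (field : List String) (es en : Nat) (hes : 0 < es)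
    (hb : en * en * es ≤ field.length) :
    (List.range en).foldl (fun f row =>
      (List.range es).foldl (fun f l =>
        f ++ [PySem.Str.join ""
          ((PySem.List.pyRange ((es * en * row + l : Nat) : Int)
              (((es * en * row + l : Nat) : Int) + (en : Int) * (es : Int))
              ((es : Nat) : Int)).map
            (fun i => PySem.List.pyGetD field i ""))]) f) [] =
    (List.range en).foldl (fun f row =>
      (pyZip ((List.range en).map (fun c =>
        PySem.List.slice
          (PySem.List.slice field (some ((row * (en * es) : Nat) : Int))
            (some (((row + 1) * (en * es) : Nat) : Int)))
          (some ((c * es : Nat) : Int)) (some (((c + 1) * es : Nat) : Int))))).foldl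
        (fun f line => f ++ [PySem.Str.join "" line]) f) [] := by
  rw [foldl_foldl_append (List.range en) (fun _ => List.range es)
    (fun row l => PySem.Str.join ""
      ((PySem.List.pyRange ((es * en * row + l : Nat) : Int)
          (((es * en * row + l : Nat) : Int) + (en : Int) * (es : Int))
          ((es : Nat) : Int)).map
        (fun i => PySem.List.pyGetD field i "")))]
  rw [foldl_foldl_append (List.range en)
    (fun row => pyZip ((List.range en).map (fun c =>
      PySem.List.slice
        (PySem.List.slice field (some ((row * (en * es) : Nat) : Int))
          (some (((row + 1) * (en * es) : Nat) : Int)))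
        (some ((c * es : Nat) : Int)) (some (((c + 1) * es : Nat) : Int)))))
    (fun _ line => PySem.Str.join "" line)]
  apply List.flatMap_congr
  intro r hrm
  rw [List.mem_range] at hrm
  have hen : 0 < en := lt_of_le_of_lt (Nat.zero_le r) hrm
  have hblk : PySem.List.slice field (some ((r * (en * es) : Nat) : Int))
      (some (((r + 1) * (en * es) : Nat) : Int))
      = (field.drop (r * (en * es))).take (en * es) := by
    rw [PySem.List.slice_natCast, Nat.succ_mul, Nat.add_sub_cancel_left]
  have hb1 : r * (en * es) + en * es ≤ field.length := by
    calc r * (en * es) + en * es = (r + 1) * (en * es) := (Nat.succ_mul r (en * es)).symm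
    _ ≤ en * (en * es) := Nat.mul_le_mul_right _ hrm
    _ = en * en * es := (Nat.mul_assoc en en es).symm
    _ ≤ field.length := hb
  have hblen : ((field.drop (r * (en * es))).take (en * es)).length = en * es := by
    rw [List.length_take, List.length_drop]
    omega
  have hchunk : ∀ c < en,
      PySem.List.slice ((field.drop (r * (en * es))).take (en * es))
        (some ((c * es : Nat) : Int)) (some (((c + 1) * es : Nat) : Int))
      = (((field.drop (r * (en * es))).take (en * es)).drop (c * es)).take es := by
    intro c hc
    rw [PySem.List.slice_natCast, Nat.succ_mul, Nat.add_sub_cancel_left]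
  have hchne : (List.range en).map (fun c =>
      PySem.List.slice ((field.drop (r * (en * es))).take (en * es))
        (some ((c * es : Nat) : Int)) (some (((c + 1) * es : Nat) : Int))) ≠ [] := by
    simp [List.range_eq_nil, hen.ne']
  have hclen : ∀ xs ∈ (List.range en).map (fun c =>
      PySem.List.slice ((field.drop (r * (en * es))).take (en * es))
        (some ((c * es : Nat) : Int)) (some (((c + 1) * es : Nat) : Int))), xs.length = es := by
    intro xs hx
    obtain ⟨c, hc, rfl⟩ := List.mem_map.mp hx
    rw [List.mem_range] at hc
    rw [hchunk c hc, List.length_take, List.length_drop, hblen]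
    have : (c + 1) * es ≤ en * es := Nat.mul_le_mul_right _ hc
    rw [Nat.succ_mul] at this
    omega
  rw [hblk, pyZip_uniform es _ hchne hclen, List.map_map]
  apply List.map_congr_left
  intro l hlm
  rw [List.mem_range] at hlm
  simp only [Function.comp]
  congr 1
  have hpos : (0 : Int) < (es : Int) := by exact_mod_cast hes
  rw [PySem.List.pyRange_of_pos _ _ hpos]
  rw [if_pos (by push_cast; nlinarith [Nat.mul_pos hen hes] : ((es * en * r + l : Nat) : Int) < ((es * en * r + l : Nat) : Int) + (en : Int) * (es : Int))]
  rw [show ((es * en * r + l : Nat) : Int) + (en : Int) * (es : Int) - ((es * en * r + l : Nat) : Int) + (es : Int) - 1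
      = ((es : Int) - 1) + (en : Int) * (es : Int) from by ring]
  rw [count_eq es en hes]
  rw [List.map_map, List.map_map]
  apply List.map_congr_left
  intro c hcm
  rw [List.mem_range] at hcm
  simp only [Function.comp]
  rw [show ((es * en * r + l : Nat) : Int) + (es : Int) * ((c : Nat) : Int)
      = ((es * en * r + l + es * c : Nat) : Int) from by push_cast; ring]
  rw [PySem.List.pyGetD_natCast]
  rw [hchunk c hcm]
  rw [getD_drop_take _ _ _ _ _ hlm]
  have hcl : c * es + l < en * es := by
    have : (c + 1) * es ≤ en * es := Nat.mul_le_mul_right _ hcm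
    rw [Nat.succ_mul] at this
    omega
  rw [getD_drop_take _ _ _ _ _ hcl]
  congr 1
  ring

-- ===== VERDICT (by name: the statement is the Claim_ definition above) =====
theorem mergeField_spec : Claim_equal_mergeField := by
  intro field _ hpre
  obtain ⟨hne, hlen0⟩ := hpre
  have hes : 0 < (PySem.Str.len (PySem.List.pyGetD field 0 "")).toNat := by
    cases field with
    | nil => exact absurd rfl hne
    | cons a as =>
      simp only [List.headD_cons] at hlen0
      simp only [PySem.List.pyGetD_zero, List.getD_cons_zero, PySem.Str.len_eq,
        Int.toNat_natCast]
      omega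
  have hb : Nat.sqrt (field.length / (PySem.Str.len (PySem.List.pyGetD field 0 "")).toNat)
      * Nat.sqrt (field.length / (PySem.Str.len (PySem.List.pyGetD field 0 "")).toNat)
      * (PySem.Str.len (PySem.List.pyGetD field 0 "")).toNat ≤ field.length := by
    have hs := Nat.sqrt_le' (field.length / (PySem.Str.len (PySem.List.pyGetD field 0 "")).toNat)
    rw [pow_two] at hs
    exact le_trans (Nat.mul_le_mul_right _ hs) (Nat.div_mul_le_self _ _)
  exact mergeField_main field _ _ hes hb
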